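-- pv_equiv track=rewrite | github.com/x7v8p3m2q9l0/python-c-vm | modules/polymorphic_engine.py | _strategy_bit_manipulation
-- ===== SOURCE A (Python) =====
-- def _strategy_bit_manipulation(value: int, depth: int) -> str:
--     """Use bit manipulation to create value"""
--     if depth <= 0 or value < 0 or value > 1000:
--         return str(value)
--
--     # Decompose into bit operations
--     bits = []
--     for i in range(16):
--         if value & (1 << i):
--             bits.append(i)
--
--     if not bits:
--         return "(0)"
--
--     # Create expression using bit shifts with parentheses
--     parts = [f"(1 << {bit})" for bit in bits]
--
--     # Build with proper parentheses
--     if len(parts) == 1: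
--         return parts[0]
--
--     result = parts[0]
--     for part in parts[1:]:
--         result = f"({result} | {part})"
--
--     return result
-- ===== SOURCE B (Python) =====
-- def _strategy_bit_manipulation(value: int, depth: int) -> str:
--     """Use bit manipulation to create value"""
--     if depth <= 0 or value < 0 or value > 1000:
--         return str(value)
--     if value == 0:
--         return "(0)"
--
--     # Recursive decomposition on the highest set bit: a power of two is its own
--     # shift term, otherwise the remainder (lower bits) forms the left operand.
--     # The left-nested grouping falls out of the recursion; no bit list, no
--     # parts list, no fold.
--     def expr(v: int) -> str:
--         top = v.bit_length() - 1
--         rest = v ^ (1 << top)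
--         if rest == 0:
--             return f"(1 << {top})"
--         return f"({expr(rest)} | (1 << {top}))"
--
--     return expr(value)
-- ===== Notes on version B (the rewrite author's own statement) =====
-- stated objective: alternative
-- what changed: Instead of scanning range(16) for set bits, building a parts list and folding it left into nested '(.. | ..)' strings, B recurses on the highest set bit (bit_length), emitting a single shift term for a power of two and otherwise wrapping the recursive expression for the lower bits with ' | (1 << top))'; the left-nested grouping emerges from the recursion with no bit list, parts list or fold.
import Mathlib
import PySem

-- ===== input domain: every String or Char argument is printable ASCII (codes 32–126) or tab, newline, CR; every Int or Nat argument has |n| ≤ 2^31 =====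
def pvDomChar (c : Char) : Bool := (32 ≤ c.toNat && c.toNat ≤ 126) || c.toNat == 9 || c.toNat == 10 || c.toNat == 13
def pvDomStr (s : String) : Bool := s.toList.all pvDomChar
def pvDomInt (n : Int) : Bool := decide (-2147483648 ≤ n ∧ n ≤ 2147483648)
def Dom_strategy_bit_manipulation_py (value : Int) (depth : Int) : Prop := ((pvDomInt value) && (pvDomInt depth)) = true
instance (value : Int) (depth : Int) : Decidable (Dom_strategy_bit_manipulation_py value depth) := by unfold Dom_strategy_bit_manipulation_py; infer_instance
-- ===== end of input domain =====

-- B is an alternative decomposition: instead of scanning range(16), building a parts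
-- list and folding it, it recurses on the highest set bit and the nesting falls out.

-- ===== PORT A =====
-- the else-branch of A, reached only when 0 ≤ value ≤ 1000 (factored out for the proof; same computation)
def pvAExpr (value : Int) : String :=
  -- bits = [i for i in range(16) if value & (1 << i)]
  let bits : List Int := (PySem.List.pyRange 0 16 1).foldl
    (fun acc i => if PySem.Int.band value ((1 : Int) <<< i.toNat) ≠ 0 then acc ++ [i] else acc) []
  match bits with
  | [] => "(0)"
  | b0 :: brest =>
    -- parts = [f"(1 << {bit})" for bit in bits]
    let p0 := "(1 << " ++ PySem.Int.toStr b0 ++ ")"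
    let prest := brest.map (fun b => "(1 << " ++ PySem.Int.toStr b ++ ")")
    if prest.length = 0 then p0
    else prest.foldl (fun result part => "(" ++ result ++ " | " ++ part ++ ")") p0

def strategy_bit_manipulation_py (value : Int) (depth : Int) : String :=
  if depth ≤ 0 ∨ value < 0 ∨ value > 1000 then PySem.Int.toStr value
  else pvAExpr value

-- ===== PORT B =====
-- def expr(v): top = v.bit_length()-1; rest = v ^ (1 << top); …
-- fuel only makes the recursion structurally total; fuel = v always suffices since rest < v
def pvBExprAux (fuel : Nat) (v : Nat) : String :=
  match fuel with
  | 0 => ""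
  | fuel + 1 =>
    let top := v.log2          -- v.bit_length() - 1 for v ≥ 1
    let rest := v ^^^ (1 <<< top)
    if rest = 0 then "(1 << " ++ PySem.Int.toStr (top : Int) ++ ")"
    else "(" ++ pvBExprAux fuel rest ++ " | (1 << " ++ PySem.Int.toStr (top : Int) ++ "))"

def strategy_bit_manipulation_py_alt (value : Int) (depth : Int) : String :=
  if depth ≤ 0 ∨ value < 0 ∨ value > 1000 then PySem.Int.toStr value
  else if value = 0 then "(0)"
  else pvBExprAux value.toNat value.toNat

-- ===== PRECONDITION & SPEC =====
def Spec_strategy_bit_manipulation_py (value : Int) (depth : Int) (out : String) : Prop := out = strategy_bit_manipulation_py_alt value depth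
instance (value : Int) (depth : Int) (out : String) : Decidable (Spec_strategy_bit_manipulation_py value depth out) := by unfold Spec_strategy_bit_manipulation_py; infer_instance

-- ===== CLAIM (what is proved, stated in full; the proofs are below) =====
def Claim_equal_strategy_bit_manipulation_py : Prop := ∀ (value : Int) (depth : Int), Dom_strategy_bit_manipulation_py value depth → Spec_strategy_bit_manipulation_py value depth (strategy_bit_manipulation_py value depth)

-- ===== LEMMAS AND PROOFS =====
set_option maxHeartbeats 4000000 in
set_option maxRecDepth 16384 in
theorem pvExpr_eq : ∀ v : Fin 1001,
    pvAExpr (v : Int)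
      = (if (v : Int) = 0 then "(0)" else pvBExprAux ((v : Int)).toNat ((v : Int)).toNat) := by
  decide

-- ===== VERDICT (by name: the statement is the Claim_ definition above) =====
theorem strategy_bit_manipulation_py_spec : Claim_equal_strategy_bit_manipulation_py := by
  intro value depth _
  unfold Spec_strategy_bit_manipulation_py strategy_bit_manipulation_py strategy_bit_manipulation_py_alt
  split
  · rfl
  · rename_i h
    push Not at h
    obtain ⟨-, h0, h1⟩ := h
    have hv : value = ((⟨value.toNat, by omega⟩ : Fin 1001) : Int) := by
      simp; omega
    rw [hv, pvExpr_eq]
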